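-- pv_equiv track=rewrite | github.com/beobmun/3_1_algorithm | algorithm/week_1/202155642_한법문.py | solution
-- ===== SOURCE A (Python) =====
-- def solution(confirmed_case):
--     answer = 0
--     splited_case = confirmed_case.split("0")
--
--     for continuous in splited_case:
--         sum_daily = 0
--         for daily in continuous:
--             if ('0' <= daily and '9' >= daily):
--                 sum_daily += ord(daily) - ord('0')
--             elif ('a' <= daily and 'z' >= daily):
--                 sum_daily += ord(daily) - ord('a') + 10
--         if (sum_daily > answer):
--             answer = sum_daily
--
--     return answer
-- ===== SOURCE B (Python) =====
-- def solution(confirmed_case):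
--     answer = 0
--     cur = 0
--     for c in confirmed_case:
--         if c == '0':
--             cur = 0
--         elif '1' <= c <= '9':
--             cur += ord(c) - ord('0')
--         elif 'a' <= c <= 'z':
--             cur += ord(c) - ord('a') + 10
--         answer = max(answer, cur)
--     return answer
-- ===== Notes on version B (the rewrite author's own statement) =====
-- stated objective: simpler
-- what changed: Replaces the split-on-zero plus nested per-segment summing loop with a single pass keeping one running segment sum that resets at each zero character and a running maximum.
import Mathlib
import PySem

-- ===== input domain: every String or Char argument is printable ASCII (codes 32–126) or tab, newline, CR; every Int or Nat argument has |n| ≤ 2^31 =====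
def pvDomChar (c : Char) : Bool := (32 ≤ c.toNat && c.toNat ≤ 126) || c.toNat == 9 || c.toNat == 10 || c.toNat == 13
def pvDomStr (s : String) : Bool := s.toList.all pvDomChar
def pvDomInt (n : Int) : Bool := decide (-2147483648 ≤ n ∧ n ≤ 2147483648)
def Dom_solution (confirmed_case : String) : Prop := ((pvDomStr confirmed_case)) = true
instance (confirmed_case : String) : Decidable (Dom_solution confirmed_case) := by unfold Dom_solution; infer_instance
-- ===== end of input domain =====

-- B replaces split('0') + nested per-segment loops by one pass with a resetting
-- running sum and a running maximum (simpler, same asymptotic cost).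

-- ===== PORT A =====
def solution (confirmed_case : String) : Int :=
  let splited_case := PySem.Chars.splitOn confirmed_case.toList ['0']
  splited_case.foldl (fun answer continuous =>
    let sum_daily := continuous.foldl (fun sd daily =>
      if '0' ≤ daily ∧ daily ≤ '9' then sd + ((daily.toNat : Int) - ('0'.toNat : Int))
      else if 'a' ≤ daily ∧ daily ≤ 'z' then sd + ((daily.toNat : Int) - ('a'.toNat : Int) + 10)
      else sd) 0
    if sum_daily > answer then sum_daily else answer) 0

-- ===== PORT B =====
def solution_alt (confirmed_case : String) : Int :=
  (confirmed_case.toList.foldl (fun st c =>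
      let cur : Int :=
        if c = '0' then 0
        else if '1' ≤ c ∧ c ≤ '9' then st.1 + ((c.toNat : Int) - ('0'.toNat : Int))
        else if 'a' ≤ c ∧ c ≤ 'z' then st.1 + ((c.toNat : Int) - ('a'.toNat : Int) + 10)
        else st.1
      (cur, max st.2 cur)) ((0 : Int), (0 : Int))).2

-- ===== PRECONDITION & SPEC =====
def Spec_solution (confirmed_case : String) (out : Int) : Prop := out = solution_alt confirmed_case
instance (confirmed_case : String) (out : Int) : Decidable (Spec_solution confirmed_case out) := by unfold Spec_solution; infer_instance

-- ===== CLAIM (what is proved, stated in full; the proofs are below) =====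
def Claim_equal_solution : Prop := ∀ (confirmed_case : String), Dom_solution confirmed_case → Spec_solution confirmed_case (solution confirmed_case)

-- ===== LEMMAS AND PROOFS =====

/-- A's per-character value. -/
def pvVal (c : Char) : Int :=
  if '0' ≤ c ∧ c ≤ '9' then (c.toNat : Int) - ('0'.toNat : Int)
  else if 'a' ≤ c ∧ c ≤ 'z' then (c.toNat : Int) - ('a'.toNat : Int) + 10
  else 0

/-- A's inner segment sum, started at `a`. -/
def pvSeg (a : Int) (cs : List Char) : Int :=
  cs.foldl (fun sd daily =>
    if '0' ≤ daily ∧ daily ≤ '9' then sd + ((daily.toNat : Int) - ('0'.toNat : Int))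
    else if 'a' ≤ daily ∧ daily ≤ 'z' then sd + ((daily.toNat : Int) - ('a'.toNat : Int) + 10)
    else sd) a

lemma pvSeg_cons (a : Int) (c : Char) (cs : List Char) :
    pvSeg a (c :: cs) = pvSeg (a + pvVal c) cs := by
  simp only [pvSeg, pvVal, List.foldl_cons]
  split_ifs <;> simp

lemma pvSeg_shift (a : Int) (cs : List Char) : pvSeg a cs = a + pvSeg 0 cs := by
  induction cs generalizing a with
  | nil => simp [pvSeg]
  | cons c cs ih =>
      rw [pvSeg_cons, pvSeg_cons, ih, ih (0 + pvVal c)]; ring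

lemma pvVal_nonneg (c : Char) : 0 ≤ pvVal c := by
  unfold pvVal
  split_ifs with h1 h2
  · obtain ⟨a, b⟩ := h1
    simp only [Char.le_def, UInt32.le_iff_toNat_le] at a b
    have e : c.toNat = c.val.toNat := rfl
    have e1 : ('0' : Char).val.toNat = 48 := rfl
    have e2 : ('0' : Char).toNat = 48 := rfl
    omega
  · obtain ⟨a, b⟩ := h2
    simp only [Char.le_def, UInt32.le_iff_toNat_le] at a b
    have e : c.toNat = c.val.toNat := rfl
    have e1 : ('a' : Char).val.toNat = 97 := rfl
    have e2 : ('a' : Char).toNat = 97 := rfl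
    omega
  · exact le_refl 0

lemma pvSeg_nonneg (cs : List Char) : 0 ≤ pvSeg 0 cs := by
  induction cs with
  | nil => simp [pvSeg]
  | cons c cs ih =>
      rw [pvSeg_cons, pvSeg_shift]
      have := pvVal_nonneg c; omega

/-- A's outer fold. -/
def pvAfold (a : Int) (segs : List (List Char)) : Int :=
  segs.foldl (fun answer continuous =>
    if pvSeg 0 continuous > answer then pvSeg 0 continuous else answer) a

lemma pvAfold_cons (a : Int) (x : List Char) (xs : List (List Char)) :
    pvAfold a (x :: xs) = pvAfold (max a (pvSeg 0 x)) xs := by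
  simp only [pvAfold, List.foldl_cons]
  congr 1; omega

/-- B's step. -/
def pvBstep (st : Int × Int) (c : Char) : Int × Int :=
  let cur : Int :=
    if c = '0' then 0
    else if '1' ≤ c ∧ c ≤ '9' then st.1 + ((c.toNat : Int) - ('0'.toNat : Int))
    else if 'a' ≤ c ∧ c ≤ 'z' then st.1 + ((c.toNat : Int) - ('a'.toNat : Int) + 10)
    else st.1
  (cur, max st.2 cur)

lemma pvBstep_ne_zero (st : Int × Int) (c : Char) (h : c ≠ '0') :
    pvBstep st c = (st.1 + pvVal c, max st.2 (st.1 + pvVal c)) := by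
  simp only [pvBstep, pvVal, h, if_false]
  have h9 : ('1' ≤ c ∧ c ≤ '9') ↔ ('0' ≤ c ∧ c ≤ '9') := by
    constructor
    · rintro ⟨a, b⟩; exact ⟨le_trans (by decide) a, b⟩
    · rintro ⟨a, b⟩
      refine ⟨?_, b⟩
      have h1 : '0' < c := lt_of_le_of_ne a (fun e => h e.symm)
      simp only [Char.lt_def, Char.le_def, UInt32.lt_iff_toNat_lt,
        UInt32.le_iff_toNat_le] at h1 ⊢
      change 48 < _ at h1
      change 49 ≤ _
      omega
  rw [if_congr h9 rfl rfl]
  split_ifs <;> simp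

-- acc accumulates reversed: go with acc equals acc.reverse ++ go with [].
lemma pvGo_acc (fuel : Nat) : ∀ (l cur : List Char) (acc : List (List Char)),
    PySem.Chars.splitOn.go ['0'] fuel l cur acc
      = acc.reverse ++ PySem.Chars.splitOn.go ['0'] fuel l cur [] := by
  induction fuel with
  | zero => intro l cur acc; simp [PySem.Chars.splitOn.go]
  | succ fuel ih =>
      intro l cur acc
      cases l with
      | nil => simp [PySem.Chars.splitOn.go]
      | cons c rest =>
          simp only [PySem.Chars.splitOn.go]
          by_cases h : List.isPrefixOf ['0'] (c :: rest)
          · simp only [h, if_true]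
            rw [ih _ _ (cur.reverse :: acc), ih _ _ (cur.reverse :: [])]
            simp
          · have h' : (['0'].isPrefixOf (c :: rest)) = false := Bool.eq_false_iff.mpr h
            simp only [h', Bool.false_eq_true, if_false]
            rw [ih rest (c :: cur) acc]

-- the first segment returned by go extends cur.reverse.
lemma pvGo_head (fuel : Nat) : ∀ (l cur : List Char),
    ∃ pre rest', PySem.Chars.splitOn.go ['0'] fuel l cur []
      = (cur.reverse ++ pre) :: rest' := by
  induction fuel with
  | zero =>
      intro l cur
      exact ⟨l, [], by simp [PySem.Chars.splitOn.go]⟩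
  | succ fuel ih =>
      intro l cur
      cases l with
      | nil => exact ⟨[], [], by simp [PySem.Chars.splitOn.go]⟩
      | cons c rest =>
          by_cases h : List.isPrefixOf ['0'] (c :: rest)
          · refine ⟨[], PySem.Chars.splitOn.go ['0'] fuel (List.drop 1 (c :: rest)) [] [], ?_⟩
            simp only [PySem.Chars.splitOn.go, h, if_true]
            rw [pvGo_acc]
            simp only [List.reverse_cons, List.reverse_nil, List.nil_append,
              List.singleton_append, List.append_nil, List.length_cons,
              List.length_nil, List.drop_succ_cons, List.drop_zero]
          · obtain ⟨pre, rest', hp⟩ := ih rest (c :: cur)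
            refine ⟨c :: pre, rest', ?_⟩
            simp only [PySem.Chars.splitOn.go, h]
            rw [hp]; simp

lemma pvPrefix_iff (c : Char) (rest : List Char) :
    List.isPrefixOf ['0'] (c :: rest) = true ↔ c = '0' := by
  constructor
  · intro hh
    have h0 : ('0' == c) = true := by simpa [List.isPrefixOf] using hh
    exact (beq_iff_eq.mp h0).symm
  · intro hh; subst hh; simp [List.isPrefixOf]

/-- Main invariant: B's one-pass fold equals A's fold over the segments go yields. -/
lemma pvMain (fuel : Nat) : ∀ (l cur : List Char) (ans : Int),
    l.length ≤ fuel → pvSeg 0 cur.reverse ≤ ans →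
    (l.foldl pvBstep (pvSeg 0 cur.reverse, ans)).2
      = pvAfold ans (PySem.Chars.splitOn.go ['0'] fuel l cur []) := by
  induction fuel with
  | zero =>
      intro l cur ans hlen hinv
      have hl : l = [] := List.eq_nil_of_length_eq_zero (Nat.le_zero.mp hlen)
      subst hl
      simp only [List.foldl_nil, PySem.Chars.splitOn.go]
      simp [pvAfold]
      omega
  | succ fuel ih =>
      intro l cur ans hlen hinv
      cases l with
      | nil =>
          simp only [List.foldl_nil, PySem.Chars.splitOn.go]
          simp [pvAfold]
          omega
      | cons c rest =>
          simp only [List.length_cons] at hlen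
          by_cases h : c = '0'
          · subst h
            simp only [PySem.Chars.splitOn.go]
            rw [if_pos ((pvPrefix_iff '0' rest).mpr rfl)]
            simp only [List.length_cons, List.length_nil, List.drop_succ_cons,
              List.drop_zero]
            have hstep : pvBstep (pvSeg 0 cur.reverse, ans) '0' = (0, ans) := by
              have h0 : 0 ≤ pvSeg 0 cur.reverse := pvSeg_nonneg _
              simp only [pvBstep]
              have : max ans (0 : Int) = ans := by omega
              simp [this]
            rw [List.foldl_cons, hstep]
            have hrec := ih rest [] ans (by omega)
              (by simp [pvSeg]; exact le_trans (pvSeg_nonneg _) hinv)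
            simp only [List.reverse_nil] at hrec
            have : pvSeg 0 ([] : List Char) = 0 := by simp [pvSeg]
            rw [this] at hrec
            rw [hrec]
            rw [pvGo_acc fuel rest [] [cur.reverse]]
            simp only [List.reverse_cons, List.reverse_nil, List.nil_append,
              List.singleton_append]
            rw [pvAfold_cons]
            have : max ans (pvSeg 0 cur.reverse) = ans := by omega
            rw [this]
          · simp only [PySem.Chars.splitOn.go]
            have h'' : ¬(List.isPrefixOf ['0'] (c :: rest) = true) := by
              rw [pvPrefix_iff]; exact h
            rw [if_neg h'']
            rw [List.foldl_cons, pvBstep_ne_zero _ _ h]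
            have hseg : pvSeg 0 (c :: cur).reverse = pvSeg 0 cur.reverse + pvVal c := by
              simp only [List.reverse_cons]
              have : pvSeg 0 (cur.reverse ++ [c]) = pvSeg (pvSeg 0 cur.reverse) [c] := by
                simp [pvSeg, List.foldl_append]
              rw [this, pvSeg_cons, pvSeg_shift]
              simp [pvSeg]
            have hrec := ih rest (c :: cur) (max ans (pvSeg 0 cur.reverse + pvVal c))
              (by omega) (by rw [hseg]; omega)
            rw [hseg] at hrec
            rw [hrec]
            obtain ⟨pre, rest', hgo⟩ := pvGo_head fuel rest (c :: cur)
            rw [hgo, pvAfold_cons, pvAfold_cons]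
            have hpreseg : pvSeg 0 ((c :: cur).reverse ++ pre)
                = pvSeg 0 cur.reverse + pvVal c + pvSeg 0 pre := by
              have : pvSeg 0 ((c :: cur).reverse ++ pre)
                  = pvSeg (pvSeg 0 (c :: cur).reverse) pre := by
                simp [pvSeg, List.foldl_append]
              rw [this, pvSeg_shift, hseg]
            have hp : 0 ≤ pvSeg 0 pre := pvSeg_nonneg _
            congr 1
            rw [hpreseg]
            omega

lemma pvSolution_eq (s : String) : solution s = solution_alt s := by
  unfold solution solution_alt PySem.Chars.splitOn
  have h := pvMain (s.toList.length + 1) s.toList [] 0 (by omega)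
    (by simp [pvSeg])
  simp only [List.reverse_nil] at h
  have h0 : pvSeg 0 ([] : List Char) = 0 := by simp [pvSeg]
  rw [h0] at h
  calc (List.foldl (fun answer continuous =>
          if (continuous.foldl (fun sd daily =>
              if '0' ≤ daily ∧ daily ≤ '9' then sd + ((daily.toNat : Int) - ('0'.toNat : Int))
              else if 'a' ≤ daily ∧ daily ≤ 'z' then sd + ((daily.toNat : Int) - ('a'.toNat : Int) + 10)
              else sd) 0) > answer
            then (continuous.foldl (fun sd daily =>
              if '0' ≤ daily ∧ daily ≤ '9' then sd + ((daily.toNat : Int) - ('0'.toNat : Int))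
              else if 'a' ≤ daily ∧ daily ≤ 'z' then sd + ((daily.toNat : Int) - ('a'.toNat : Int) + 10)
              else sd) 0)
            else answer) 0
          (PySem.Chars.splitOn.go ['0'] (s.toList.length + 1) s.toList [] []))
      = pvAfold 0 (PySem.Chars.splitOn.go ['0'] (s.toList.length + 1) s.toList [] []) := rfl
    _ = (s.toList.foldl pvBstep (0, 0)).2 := h.symm
    _ = (s.toList.foldl (fun st c =>
          let cur : Int :=
            if c = '0' then 0
            else if '1' ≤ c ∧ c ≤ '9' then st.1 + ((c.toNat : Int) - ('0'.toNat : Int))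
            else if 'a' ≤ c ∧ c ≤ 'z' then st.1 + ((c.toNat : Int) - ('a'.toNat : Int) + 10)
            else st.1
          (cur, max st.2 cur)) ((0 : Int), (0 : Int))).2 := rfl

-- ===== VERDICT (by name: the statement is the Claim_ definition above) =====
theorem solution_spec : Claim_equal_solution := by
  intro s _
  unfold Spec_solution
  exact pvSolution_eq s
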